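-- pv_equiv track=rewrite | github.com/julien-zucchet/wilson_algorithm | wilsons_algorithm_erased_online.py | loop_erase
-- ===== SOURCE A (Python) =====
-- def loop_erase(w):
--     if len(w) <= 1 :
--         return w
--     else:
--         first = w[0]
--         if first in w[1:]:
--             index = w[1:].index(first)
--             return loop_erase([first] + w[index + 2:])
--         else:
--             return [first] + loop_erase(w[1:])
-- ===== SOURCE B (Python) =====
-- def loop_erase(w):
--     # Single forward pass: keep a path stack and a set of vertices on it;
--     # on revisiting a vertex, pop the stack back to its earlier occurrence.
--     path = []
--     on_path = set()
--     for x in w: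
--         if x in on_path:
--             while path[-1] != x:
--                 on_path.remove(path.pop())
--         else:
--             path.append(x)
--             on_path.add(x)
--     return path
-- ===== Notes on version B (the rewrite author's own statement) =====
-- stated objective: faster
-- what changed: Replaced A's recursive restart-from-scratch loop erasure (membership scan, .index and list slicing at every step, then recursing on a rebuilt list) by a single forward pass that keeps a path stack and a set of on-path vertices, popping the stack back to the earlier occurrence on a revisit.
import Mathlib
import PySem

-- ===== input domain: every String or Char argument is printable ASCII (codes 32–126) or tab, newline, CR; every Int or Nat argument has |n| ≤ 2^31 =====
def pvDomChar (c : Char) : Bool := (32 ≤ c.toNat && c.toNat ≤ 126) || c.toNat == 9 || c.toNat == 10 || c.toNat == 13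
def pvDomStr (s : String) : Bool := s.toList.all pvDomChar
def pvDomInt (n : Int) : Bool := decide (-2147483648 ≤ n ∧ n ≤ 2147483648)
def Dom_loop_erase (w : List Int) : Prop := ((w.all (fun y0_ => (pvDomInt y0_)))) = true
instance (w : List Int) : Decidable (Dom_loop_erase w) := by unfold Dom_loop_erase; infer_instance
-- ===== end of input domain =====

-- B replaces A's O(n^2) recursive slice-and-restart loop erasure by a single forward
-- pass with a path stack and an on-path set (objective: faster, asymptotic).

-- ===== PORT A =====
def loop_erase (w : List Int) : List Int :=
  if h : w.length ≤ 1 then w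
  else
    -- w.headI is w[0] (exact: w ≠ [] here); PySem.List.slice w (some 1) none is w[1:];
    -- (PySem.List.index? (w[1:]) w[0]).getD 0 is w[1:].index(w[0]) (the membership test
    -- guarantees index? is some, so the default 0 is never taken).
    if w.headI ∈ PySem.List.slice w (some 1) none then
      loop_erase (w.headI :: PySem.List.slice w
        (some ((((PySem.List.index? (PySem.List.slice w (some 1) none) w.headI).getD 0) + 2 : Nat) : Int)) none)
    else
      w.headI :: loop_erase (PySem.List.slice w (some 1) none)
termination_by w.length
decreasing_by
  · rw [PySem.List.slice_from_natCast]
    simp only [List.length_cons, List.length_drop]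
    omega
  · rw [PySem.List.slice_from_one]
    simp only [List.length_tail]
    omega

-- ===== PORT B =====
-- The path stack is kept reversed (head = top of stack); on_path is the set.
-- pvPop is the inner 'while path[-1] != x: on_path.remove(path.pop())' loop;
-- its [] case is unreachable in loop_erase_alt (x is in on_path, hence on the path),
-- and 'discard' equals Python's set.remove there (the popped element is in the set).
def pvPop (x : Int) : List Int → PySem.Set Int → List Int × PySem.Set Int
  | [], s => ([], s)
  | y :: t, s => if y = x then (y :: t, s) else pvPop x t (PySem.Set.discard s y)

def pvStep (st : List Int × PySem.Set Int) (x : Int) : List Int × PySem.Set Int :=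
  if PySem.Set.contains st.2 x then pvPop x st.1 st.2
  else (x :: st.1, PySem.Set.add st.2 x)

def loop_erase_alt (w : List Int) : List Int :=
  ((w.foldl pvStep ([], PySem.Set.empty)).1).reverse

-- ===== PRECONDITION & SPEC =====
def Spec_loop_erase (w : List Int) (out : List Int) : Prop := out = loop_erase_alt w
instance (w : List Int) (out : List Int) : Decidable (Spec_loop_erase w out) := by unfold Spec_loop_erase; infer_instance

-- ===== CLAIM (what is proved, stated in full; the proofs are below) =====
def Claim_equal_loop_erase : Prop := ∀ (w : List Int), Dom_loop_erase w → Spec_loop_erase w (loop_erase w)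

-- ===== LEMMAS AND PROOFS =====

-- Pure step function of B (the set stripped away): push x, or drop back to x's occurrence.
def pvG (rev : List Int) (x : Int) : List Int :=
  if x ∈ rev then rev.dropWhile (fun y => !(y == x)) else x :: rev

theorem pvPop_spec (x : Int) (rev : List Int) (s : PySem.Set Int)
    (hn : rev.Nodup) (hs : ∀ a : Int, a ∈ s ↔ a ∈ rev) :
    (pvPop x rev s).1 = rev.dropWhile (fun y => !(y == x)) ∧
      ∀ a : Int, a ∈ (pvPop x rev s).2 ↔ a ∈ rev.dropWhile (fun y => !(y == x)) := by
  induction rev generalizing s with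
  | nil => simpa [pvPop] using hs
  | cons y t ih =>
    by_cases hyx : y = x
    · subst hyx
      refine ⟨by simp [pvPop], fun a => ?_⟩
      have := hs a
      simp only [List.mem_cons] at this
      simpa [pvPop] using this
    · have hnt : t.Nodup := hn.of_cons
      have hynmem : y ∉ t := (List.nodup_cons.mp hn).1
      have hs' : ∀ a : Int, a ∈ PySem.Set.discard s y ↔ a ∈ t := by
        intro a
        rw [PySem.Set.mem_discard]
        constructor
        · rintro ⟨ha, hay⟩
          have hmem := (hs a).mp ha
          simp only [List.mem_cons] at hmem
          rcases hmem with h | h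
          · exact absurd h hay
          · exact h
        · intro ha
          exact ⟨(hs a).mpr (List.mem_cons_of_mem _ ha), fun hay => hynmem (hay ▸ ha)⟩
        
      have := ih (PySem.Set.discard s y) hnt hs'
      simpa [pvPop, hyx, List.dropWhile_cons] using this

theorem pvG_nodup (rev : List Int) (x : Int) (hn : rev.Nodup) : (pvG rev x).Nodup := by
  unfold pvG
  split
  · exact (List.dropWhile_sublist _).nodup hn
  · exact List.nodup_cons.mpr ⟨by assumption, hn⟩

theorem foldl_pvStep_fst (w : List Int) (rev : List Int) (s : PySem.Set Int)
    (hn : rev.Nodup) (hs : ∀ a : Int, a ∈ s ↔ a ∈ rev) :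
    (w.foldl pvStep (rev, s)).1 = w.foldl pvG rev := by
  induction w generalizing rev s with
  | nil => rfl
  | cons x xs ih =>
    simp only [List.foldl_cons]
    by_cases hx : x ∈ rev
    · have hc : PySem.Set.contains s x = true := (PySem.Set.contains_iff s x).mpr ((hs x).mpr hx)
      obtain ⟨h1, h2⟩ := pvPop_spec x rev s hn hs
      have hstep : pvStep (rev, s) x = pvPop x rev s := by
        simp only [pvStep]; rw [hc]; simp
      have hG : pvG rev x = rev.dropWhile (fun y => !(y == x)) := by simp [pvG, hx]
      have hn' : (pvG rev x).Nodup := pvG_nodup rev x hn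
      rw [hstep, ← Prod.mk.eta (p := pvPop x rev s), h1, ← hG]
      exact ih _ _ hn' (by rw [hG]; exact h2)
    · have hc : PySem.Set.contains s x = false := by
        rw [Bool.eq_false_iff, ne_eq, PySem.Set.contains_iff s x]
        intro hmem; exact hx ((hs x).mp hmem)
      have hstep : pvStep (rev, s) x = (x :: rev, PySem.Set.add s x) := by
        simp only [pvStep]; rw [hc]; simp
      have hG : pvG rev x = x :: rev := by simp [pvG, hx]
      rw [hstep, ← hG]
      refine ih _ _ (by rw [hG]; exact List.nodup_cons.mpr ⟨hx, hn⟩) ?_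
      intro a
      rw [hG, PySem.Set.mem_add, hs a, List.mem_cons]
      tauto

-- x not yet revisited: x stays at the bottom of the stack and never reappears above it.
theorem pvKey (x : Int) (ys : List Int) (hx : x ∉ ys) :
    ∀ t : List Int, x ∉ t →
      ys.foldl pvG (t ++ [x]) = ys.foldl pvG t ++ [x] ∧ x ∉ ys.foldl pvG t := by
  induction ys with
  | nil => intro t ht; exact ⟨rfl, ht⟩
  | cons y ys ih =>
    intro t ht
    have hyx : y ≠ x := fun h => hx (h ▸ List.mem_cons_self)
    have hx' : x ∉ ys := fun h => hx (List.mem_cons_of_mem _ h)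
    simp only [List.foldl_cons]
    by_cases hyt : y ∈ t
    · have hne : t.dropWhile (fun a => !(a == y)) ≠ [] := by
        rw [ne_eq, List.dropWhile_eq_nil_iff]
        push Not
        exact ⟨y, hyt, by simp⟩
      have h1 : pvG (t ++ [x]) y = t.dropWhile (fun a => !(a == y)) ++ [x] := by
        rw [pvG, if_pos (List.mem_append_left _ hyt), List.dropWhile_append]
        simp [List.isEmpty_iff, hne]
      have h2 : pvG t y = t.dropWhile (fun a => !(a == y)) := by rw [pvG, if_pos hyt]
      have hxd : x ∉ t.dropWhile (fun a => !(a == y)) :=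
        fun h => ht ((List.dropWhile_sublist _).mem h)
      rw [h1, h2]
      exact ih hx' _ hxd
    · have hyt' : y ∉ t ++ [x] := by
        simp only [List.mem_append, List.mem_singleton]
        rintro (h | h)
        · exact hyt h
        · exact hyx h
      have h1 : pvG (t ++ [x]) y = (y :: t) ++ [x] := by rw [pvG, if_neg hyt']; rfl
      have h2 : pvG t y = y :: t := by rw [pvG, if_neg hyt]
      rw [h1, h2]
      refine ih hx' (y :: t) ?_
      simp only [List.mem_cons]
      rintro (h | h)
      · exact hyx h.symm
      · exact ht h

theorem pvDrop_all (x : Int) (f : List Int) (hf : x ∉ f) :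
    (f ++ [x]).dropWhile (fun y => !(y == x)) = [x] := by
  have h0 : f.dropWhile (fun y => !(y == x)) = [] := by
    rw [List.dropWhile_eq_nil_iff]
    intro a ha
    simp only [Bool.not_eq_eq_eq_not, Bool.not_true, beq_eq_false_iff_ne, ne_eq]
    exact fun h => hf (h ▸ ha)
  rw [List.dropWhile_append, h0]
  simp

theorem pvMain : ∀ (n : ℕ) (w : List Int), w.length ≤ n →
    w.foldl pvG [] = (loop_erase w).reverse := by
  intro n
  induction n with
  | zero =>
    intro w hw
    have : w = [] := List.eq_nil_of_length_eq_zero (Nat.le_zero.mp hw)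
    subst this
    rw [loop_erase]
    rfl
  | succ n ih =>
    intro w hw
    by_cases hlen : w.length ≤ 1
    · rw [loop_erase, dif_pos hlen]
      match w, hlen with
      | [], _ => rfl
      | [a], _ => simp [pvG]
    · obtain ⟨x, xs, rfl⟩ : ∃ x xs, w = x :: xs := by
        cases w with
        | nil => simp at hlen
        | cons a b => exact ⟨a, b, rfl⟩
      have htl : PySem.List.slice (x :: xs) (some 1) none = xs := by
        rw [PySem.List.slice_from_one]; rfl
      have hGx : pvG [] x = [x] := by simp [pvG]
      by_cases hmem : x ∈ xs
      · -- x revisited: both sides restart from x's first later occurrence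
        obtain ⟨k, hk⟩ : ∃ k, PySem.List.index? xs x = some k :=
          Option.isSome_iff_exists.mp ((PySem.List.index?_isSome_iff xs x).mpr hmem)
        obtain ⟨ys, zs, hsplit, hklen, hxys⟩ := (PySem.List.index?_eq_some_iff xs x k).mp hk
        -- A side
        have hA : loop_erase (x :: xs) = loop_erase (x :: zs) := by
          rw [loop_erase, dif_neg hlen]
          simp only [htl, List.headI, hk, Option.getD_some]
          rw [if_pos hmem]
          congr 2
          rw [PySem.List.slice_from_natCast, List.drop_succ_cons, hsplit, ← hklen]
          have hlen2 : ys.length + 1 = (ys ++ [x]).length := by simp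
          rw [show ys ++ x :: zs = (ys ++ [x]) ++ zs by simp, hlen2, List.drop_left]
        -- B side
        have hfold : (x :: xs).foldl pvG [] = (x :: zs).foldl pvG [] := by
          obtain ⟨heq, hnm⟩ := pvKey x ys hxys [] List.not_mem_nil
          have heq' : List.foldl pvG [x] ys = List.foldl pvG [] ys ++ [x] := by
            simpa using heq
          have hGpop : pvG (List.foldl pvG [] ys ++ [x]) x = [x] := by
            rw [pvG, if_pos (List.mem_append_right _ (List.mem_singleton_self x))]
            exact pvDrop_all x _ hnm
          rw [hsplit]
          calc List.foldl pvG [] (x :: (ys ++ x :: zs))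
              = List.foldl pvG [x] (ys ++ x :: zs) := by simp only [List.foldl_cons, hGx]
            _ = List.foldl pvG (pvG (List.foldl pvG [x] ys) x) zs := by
                rw [show ys ++ x :: zs = (ys ++ [x]) ++ zs by simp, List.foldl_append,
                  List.foldl_append]
                simp only [List.foldl_cons, List.foldl_nil]
            _ = List.foldl pvG [x] zs := by rw [heq', hGpop]
            _ = List.foldl pvG [] (x :: zs) := by simp only [List.foldl_cons, hGx]
        rw [hfold, hA]
        refine ih (x :: zs) ?_
        have : zs.length < xs.length := by
          rw [hsplit]; simp only [List.length_append, List.length_cons]; omega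
        simp only [List.length_cons] at hw ⊢
        omega
      · -- x not revisited
        have hA : loop_erase (x :: xs) = x :: loop_erase xs := by
          rw [loop_erase, dif_neg hlen]
          simp only [htl, List.headI]
          rw [if_neg hmem]
        obtain ⟨heq, _⟩ := pvKey x xs hmem [] List.not_mem_nil
        have hfold : (x :: xs).foldl pvG [] = xs.foldl pvG [] ++ [x] := by
          simp only [List.foldl_cons, hGx]
          simpa using heq
        rw [hfold, hA, ih xs (by simp only [List.length_cons] at hw; omega)]
        simp

-- ===== VERDICT (by name: the statement is the Claim_ definition above) =====
theorem loop_erase_spec : Claim_equal_loop_erase := by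
  intro w _
  unfold Spec_loop_erase loop_erase_alt
  rw [foldl_pvStep_fst w [] PySem.Set.empty List.nodup_nil (by simp [PySem.Set.empty])]
  rw [pvMain w.length w le_rfl]
  simp
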